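-- pv_equiv track=rewrite | github.com/Hafeezmhk7/Hafeez_ecir_tiger | data/p5.py | get_interaction
-- ===== SOURCE A (Python) =====
-- def get_interaction(datas):
--     user_seq = {}
--     for data in datas:
--         user, item, time = data
--         if user in user_seq:
--             user_seq[user].append((item, time))
--         else:
--             user_seq[user] = []
--             user_seq[user].append((item, time))
--
--     for user, item_time in user_seq.items():
--         item_time.sort(key=lambda x: x[1])
--         items = []
--         for t in item_time:
--             items.append(t[0])
--         user_seq[user] = items
--     return user_seq
-- ===== SOURCE B (Python) =====
-- def get_interaction(datas):
--     # One global stable sort by time, then a single grouping pass.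
--     user_seq = {user: [] for user, _, _ in datas}
--     for user, item, _ in sorted(datas, key=lambda d: d[2]):
--         user_seq[user].append(item)
--     return user_seq
-- ===== Notes on version B (the rewrite author's own statement) =====
-- stated objective: alternative
-- what changed: Instead of grouping (item,time) pairs per user and then sorting each user's list, B does one global stable sort of all interactions by time and a single grouping pass appending items into per-user lists pre-created in first-appearance order.
import Mathlib
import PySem

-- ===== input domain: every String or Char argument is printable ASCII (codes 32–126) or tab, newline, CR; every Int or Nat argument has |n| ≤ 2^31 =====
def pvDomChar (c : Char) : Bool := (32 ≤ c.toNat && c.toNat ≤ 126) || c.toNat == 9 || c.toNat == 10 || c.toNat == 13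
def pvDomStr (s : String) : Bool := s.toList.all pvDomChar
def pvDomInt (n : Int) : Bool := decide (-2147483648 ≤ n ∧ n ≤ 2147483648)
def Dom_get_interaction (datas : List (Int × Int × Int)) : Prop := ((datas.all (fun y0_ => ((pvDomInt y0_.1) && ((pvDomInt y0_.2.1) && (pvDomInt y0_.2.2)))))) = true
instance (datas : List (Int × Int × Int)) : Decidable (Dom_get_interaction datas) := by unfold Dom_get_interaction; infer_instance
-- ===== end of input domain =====

-- B replaces A's group-then-sort-each-user with one global stable sort by time followed by a single grouping pass (alternative decomposition, same result).

-- ===== PORT A =====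
-- first loop: user_seq[user] gets (item, time) appended (created as [] first when absent)
def pvGroupA (datas : List (Int × Int × Int)) : PySem.Dict Int (List (Int × Int)) :=
  datas.foldl (fun d p =>
    if d.contains p.1 then
      d.insert p.1 (d.getD p.1 [] ++ [(p.2.1, p.2.2)])
    else
      let d' := d.insert p.1 []
      d'.insert p.1 (d'.getD p.1 [] ++ [(p.2.1, p.2.2)])) PySem.Dict.empty

-- second loop: per user, sort (item, time) by time and keep the items.
-- Python overwrites user_seq[user] in place (values change type pair-list → int-list);
-- ported exactly as rebuilding the dict key by key in the same iteration order.
def get_interaction (datas : List (Int × Int × Int)) : List (Int × List Int) :=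
  let user_seq := pvGroupA datas
  (user_seq.items.foldl (fun d q =>
      d.insert q.1 ((PySem.List.sorted q.2 (fun x => x.2) false).foldl
        (fun items t => items ++ [t.1]) ([] : List Int))) PySem.Dict.empty).items

-- ===== PORT B =====
def get_interaction_alt (datas : List (Int × Int × Int)) : List (Int × List Int) :=
  -- user_seq = {user: [] for user, _, _ in datas}
  let user_seq : PySem.Dict Int (List Int) :=
    datas.foldl (fun d p => d.insert p.1 []) PySem.Dict.empty
  -- for user, item, _ in sorted(datas, key=lambda d: d[2]): user_seq[user].append(item)
  ((PySem.List.sorted datas (fun p => p.2.2) false).foldl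
      (fun d p => d.insert p.1 (d.getD p.1 [] ++ [p.2.1])) user_seq).items

-- ===== PRECONDITION & SPEC =====
def Spec_get_interaction (datas : List (Int × Int × Int)) (out : List (Int × List Int)) : Prop := out = get_interaction_alt datas
instance (datas : List (Int × Int × Int)) (out : List (Int × List Int)) : Decidable (Spec_get_interaction datas out) := by unfold Spec_get_interaction; infer_instance

-- ===== CLAIM (what is proved, stated in full; the proofs are below) =====
def Claim_equal_get_interaction : Prop := ∀ (datas : List (Int × Int × Int)), Dom_get_interaction datas → Spec_get_interaction datas (get_interaction datas)

-- ===== LEMMAS AND PROOFS =====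

-- A's two append branches are both Python's d[k] = d.get(k, []) + [(i, t)]
theorem pv_stepA_eq_modify (d : PySem.Dict Int (List (Int × Int))) (p : Int × Int × Int) :
    (if d.contains p.1 then
      d.insert p.1 (d.getD p.1 [] ++ [(p.2.1, p.2.2)])
    else
      let d' := d.insert p.1 []
      d'.insert p.1 (d'.getD p.1 [] ++ [(p.2.1, p.2.2)]))
    = d.modify p.1 [] (fun v => v ++ [p.2]) := by
  by_cases h : d.contains p.1
  · simp [h, PySem.Dict.modify]
  · simp only [h, PySem.Dict.modify, PySem.Dict.getD_insert_self,
      PySem.Dict.insert_insert_self, PySem.Dict.getD_of_not_contains d [] (by simpa using h)]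
    simp

theorem pv_getD_foldl_insert_nil (l : List (Int × Int × Int)) (d : PySem.Dict Int (List Int))
    (u : Int) (h : d.getD u [] = []) :
    (l.foldl (fun d p => d.insert p.1 []) d).getD u [] = [] := by
  induction l generalizing d with
  | nil => exact h
  | cons p t ih =>
    simp only [List.foldl_cons]
    exact ih _ (by rw [PySem.Dict.getD_insert]; split <;> simp [h])

theorem pv_set_update_of_subset (s : PySem.Set Int) (l : List Int) (h : ∀ x ∈ l, x ∈ s) :
    PySem.Set.update s l = s := by
  induction l generalizing s with
  | nil => rfl
  | cons x t ih =>
    have hc : PySem.Set.add s x = s := by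
      simp [PySem.Set.add, PySem.Set.contains, h x List.mem_cons_self]
    simp only [PySem.Set.update, List.foldl_cons]
    rw [show List.foldl PySem.Set.add (PySem.Set.add s x) t = PySem.Set.update (PySem.Set.add s x) t from rfl,
      hc, ih s (fun y hy => h y (by simp [hy]))]

theorem pv_insertBy_map {α β κ : Type} [LinearOrder κ] (g : α → β) (k : β → κ) (x : α)
    (ys : List α) :
    PySem.List.insertBy (fun a b => decide (k a < k b)) (g x) (ys.map g)
      = (PySem.List.insertBy (fun a b => decide (k (g a) < k (g b))) x ys).map g := by
  induction ys with
  | nil => rfl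
  | cons y t ih =>
    simp only [List.map_cons, PySem.List.insertBy]
    split <;> simp_all

theorem pv_foldl_insertBy_map {α β κ : Type} [LinearOrder κ] (g : α → β) (k : β → κ)
    (l : List α) (ys : List α) :
    (l.map g).foldl (fun acc x => PySem.List.insertBy (fun a b => decide (k a < k b)) x acc) (ys.map g)
      = (l.foldl (fun acc x => PySem.List.insertBy (fun a b => decide (k (g a) < k (g b))) x acc) ys).map g := by
  induction l generalizing ys with
  | nil => rfl
  | cons x t ih => simpa [pv_insertBy_map g k x ys] using ih (PySem.List.insertBy _ x ys)

theorem pv_sorted_map {α β κ : Type} [LinearOrder κ] (g : α → β) (k : β → κ) (l : List α) :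
    PySem.List.sorted (l.map g) k false = (PySem.List.sorted l (fun a => k (g a)) false).map g := by
  rw [PySem.List.sorted_eq_foldl_insertBy, PySem.List.sorted_eq_foldl_insertBy]
  simpa using pv_foldl_insertBy_map g k l []

theorem pv_filter_insertBy {α κ : Type} [LinearOrder κ] (p : α → Bool) (key : α → κ) (x : α)
    (ys : List α) (hs : ys.Pairwise (fun a b => key a ≤ key b)) :
    (PySem.List.insertBy (fun a b => decide (key a < key b)) x ys).filter p
      = if p x then PySem.List.insertBy (fun a b => decide (key a < key b)) x (ys.filter p)
        else ys.filter p := by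
  induction ys with
  | nil =>
    simp only [PySem.List.insertBy, List.filter_nil]
    cases hx : p x <;> simp [hx]
  | cons y t ih =>
    rcases List.pairwise_cons.mp hs with ⟨hy, ht⟩
    simp only [PySem.List.insertBy]
    by_cases hb : key x < key y
    · have hbd : decide (key x < key y) = true := by simpa using hb
      simp only [hbd]
      simp only [if_true]
      cases hx : p x with
      | false => simp [List.filter_cons, hx]
      | true =>
        have hself : PySem.List.insertBy (fun a b => decide (key a < key b)) x ((y :: t).filter p)
            = x :: (y :: t).filter p := by
          cases hcl : (y :: t).filter p with
          | nil => rfl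
          | cons z zs =>
            have hz : z ∈ (y :: t).filter p := hcl ▸ List.mem_cons_self
            have hlt : key x < key z := by
              rcases List.mem_cons.mp (List.mem_filter.mp hz).1 with h | h
              · exact h ▸ hb
              · exact lt_of_lt_of_le hb (hy z h)
            simp [PySem.List.insertBy, hlt]
        rw [hself]
        simp [List.filter_cons, hx]
    · have hbd : decide (key x < key y) = false := by simpa using hb
      simp only [hbd]
      simp only [Bool.false_eq_true, if_false]
      cases hx : p x <;> cases hpy : p y <;>
        simp [hx, hpy, ih ht, PySem.List.insertBy, hbd]

theorem pv_filter_foldl_insertBy {α κ : Type} [LinearOrder κ] (p : α → Bool) (key : α → κ)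
    (l : List α) (acc : List α) (hs : acc.Pairwise (fun a b => key a ≤ key b)) :
    (l.foldl (fun a x => PySem.List.insertBy (fun a b => decide (key a < key b)) x a) acc).filter p
      = (l.filter p).foldl (fun a x => PySem.List.insertBy (fun a b => decide (key a < key b)) x a)
          (acc.filter p) := by
  induction l generalizing acc with
  | nil => rfl
  | cons x t ih =>
    have hs' := PySem.List.insertBy_pairwise_le key x acc hs
    simp only [List.foldl_cons, List.filter_cons]
    rw [ih _ hs', pv_filter_insertBy p key x acc hs]
    split <;> rfl

theorem pv_filter_sorted {α κ : Type} [LinearOrder κ] (p : α → Bool) (key : α → κ)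
    (l : List α) :
    (PySem.List.sorted l key false).filter p = PySem.List.sorted (l.filter p) key false := by
  rw [PySem.List.sorted_eq_foldl_insertBy, PySem.List.sorted_eq_foldl_insertBy]
  simpa using pv_filter_foldl_insertBy p key l [] (by simp)

theorem pv_groupA_eq (datas : List (Int × Int × Int)) :
    pvGroupA datas
      = datas.foldl (fun d p => d.modify p.1 [] (fun v => v ++ [p.2])) PySem.Dict.empty := by
  unfold pvGroupA
  apply PySem.List.foldl_congr_mem
  intro d p _
  exact pv_stepA_eq_modify d p

theorem get_interaction_spec_aux (datas : List (Int × Int × Int)) :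
    get_interaction datas = get_interaction_alt datas := by
  set K : PySem.Set Int := PySem.Set.ofList (datas.map (fun p => p.1)) with hK
  set G : List (Int × Int) → List Int :=
    fun v => (PySem.List.sorted v (fun x => x.2) false).map (fun t => t.1) with hG
  -- ===== A side =====
  have hd1 := pv_groupA_eq datas
  have hd1keys : (pvGroupA datas).keys = K := by
    rw [hd1, PySem.Dict.keys_foldl_modify_key datas (fun p => p.1) [] (fun _ p v => v ++ [p.2])]
    simp [PySem.Set.update, PySem.Dict.keys_empty, hK, PySem.Set.ofList_eq_foldl]
  have hd1nodup : (pvGroupA datas).keys.Nodup := by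
    rw [hd1]
    exact PySem.Dict.nodup_keys_foldl_modify_key datas (fun p => p.1) [] _ _
      (by simp [PySem.Dict.keys_empty])
  have hd1getD : ∀ u, (pvGroupA datas).getD u []
      = (datas.filter (fun p => p.1 == u)).map (fun p => p.2) := by
    intro u
    rw [hd1]
    simpa using PySem.Dict.getD_foldl_modify_append datas PySem.Dict.empty u
  have hA : get_interaction datas = K.map (fun u => (u, G ((pvGroupA datas).getD u []))) := by
    show ((pvGroupA datas).items.foldl (fun d q =>
      d.insert q.1 ((PySem.List.sorted q.2 (fun x => x.2) false).foldl
        (fun items t => items ++ [t.1]) ([] : List Int))) PySem.Dict.empty).items = _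
    have hstep : ∀ (d : PySem.Dict Int (List Int)) (q : Int × List (Int × Int)),
        q ∈ (pvGroupA datas).items →
        d.insert q.1 ((PySem.List.sorted q.2 (fun x => x.2) false).foldl
          (fun items t => items ++ [t.1]) ([] : List Int)) = d.insert q.1 (G q.2) := by
      intro d q _
      rw [hG]
      simp only [PySem.List.foldl_append_singleton_eq_map, List.nil_append]
    rw [PySem.List.foldl_congr_mem _ _ _ _ hstep,
      PySem.Dict.items_foldl_insert_fresh (pvGroupA datas).items (fun q => q.1)
        (fun q => G q.2) PySem.Dict.empty (fun a _ => by simp [pysem]) hd1nodup]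
    rw [show (pvGroupA datas).items = (pvGroupA datas).keys.map
        (fun k => (k, (pvGroupA datas).getD k [])) from PySem.Dict.items_eq_map_keys _ hd1nodup []]
    rw [List.map_map, hd1keys]
    rfl
  -- ===== B side =====
  set s := PySem.List.sorted datas (fun p => p.2.2) false with hs
  set d0 : PySem.Dict Int (List Int) :=
    datas.foldl (fun d p => d.insert p.1 []) PySem.Dict.empty with hd0
  have hd0keys : d0.keys = K := by
    rw [hd0, PySem.Dict.keys_foldl_insert_key datas (fun p => p.1) (fun _ _ => [])]
    simp [PySem.Set.update, PySem.Dict.keys_empty, hK, PySem.Set.ofList_eq_foldl]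
  have hd0nodup : d0.keys.Nodup := by
    rw [hd0]
    exact PySem.Dict.nodup_keys_foldl_insert_key datas (fun p => p.1) _ _
      (by simp [PySem.Dict.keys_empty])
  have hd0getD : ∀ u, d0.getD u [] = [] := by
    intro u
    rw [hd0]
    exact pv_getD_foldl_insert_nil datas PySem.Dict.empty u (by simp [pysem])
  set dB := s.foldl (fun d p => d.insert p.1 (d.getD p.1 [] ++ [p.2.1])) d0 with hdB
  have hB : get_interaction_alt datas = dB.items := by rfl
  have hBkeys : dB.keys = K := by
    rw [hdB, PySem.Dict.keys_foldl_insert_key s (fun p => p.1)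
      (fun d p => d.getD p.1 [] ++ [p.2.1]), hd0keys]
    apply pv_set_update_of_subset
    intro x hx
    rcases List.mem_map.mp hx with ⟨q, hq, hq1⟩
    rw [hK]
    have : q ∈ datas := (PySem.List.sorted_perm datas (fun p => p.2.2) false).mem_iff.mp hq
    simpa [PySem.Set.mem_ofList] using List.mem_map.mpr ⟨q, this, hq1⟩
  have hBnodup : dB.keys.Nodup := by
    rw [hdB]
    exact PySem.Dict.nodup_keys_foldl_insert_key s (fun p => p.1) _ _ hd0nodup
  have hBgetD : ∀ u, dB.getD u [] = (s.filter (fun p => p.1 == u)).map (fun p => p.2.1) := by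
    intro u
    have hmap : dB = (s.map (fun p => (p.1, p.2.1))).foldl
        (fun d q => d.modify q.1 [] (fun v => v ++ [q.2])) d0 := by
      rw [hdB, List.foldl_map]; rfl
    rw [hmap, PySem.Dict.getD_foldl_modify_append, hd0getD, List.filter_map]
    simp [Function.comp_def]
  -- ===== per-user value agreement =====
  have hval : ∀ u, G ((pvGroupA datas).getD u []) = dB.getD u [] := by
    intro u
    rw [hBgetD u, hd1getD u, hG]
    beta_reduce
    rw [pv_sorted_map (fun p : Int × Int × Int => p.2) (fun x : Int × Int => x.2)
      (datas.filter (fun p => p.1 == u))]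
    rw [hs, pv_filter_sorted (fun p => p.1 == u) (fun p : Int × Int × Int => p.2.2) datas]
    simp [List.map_map, Function.comp]
  -- ===== items equality =====
  rw [hA, hB, PySem.Dict.items_eq_map_keys dB hBnodup [], hBkeys]
  exact List.map_congr_left (fun u _ => by rw [hval u])

-- ===== VERDICT (by name: the statement is the Claim_ definition above) =====
theorem get_interaction_spec : Claim_equal_get_interaction := by
  intro datas _
  exact get_interaction_spec_aux datas
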